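-- pv_equiv track=rewrite | github.com/nesrine-fl/project--algo-subsetsum | sat.py | solve_sat_bruteforce
-- ===== SOURCE A (Python) =====
-- from itertools import product
--
-- def verify_sat(formula, assignment):
--     """
--     Vérifie si une affectation satisfait une formule SAT
--
--     Args:
--         formula: Liste de clauses, chaque clause = liste de littéraux
--                  Format DIMACS: [1, -2] = x1 OU non-x2
--         assignment: Dictionnaire {variable: booléen}
--                     ex: {1: True, 2: False, 3: True}
--
--     Returns:
--         bool: True si satisfaite, False sinon
--     """
--     for clause in formula:
--         clause_satisfied = False
--
--         for literal in clause:
--             var = abs(literal)  # Numéro de variable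
--             is_positive = literal > 0  # True si pas de négation
--
--             if var in assignment:
--                 # Un littéral est vrai si:
--                 # - (positif ET variable=True) OU (négatif ET variable=False)
--                 if (is_positive and assignment[var]) or \
--                    (not is_positive and not assignment[var]):
--                     clause_satisfied = True
--                     break  # Cette clause est OK
--
--         if not clause_satisfied:
--             return False  # Une clause non satisfaite → échec
--
--     return True  # Toutes les clauses satisfaites
--
-- def solve_sat_bruteforce(formula, num_vars):
--     """
--     Résout SAT par force brute (teste toutes les combinaisons)
--     Args:
--         formula: Formule au format DIMACS
--         num_vars: nombre de variables (int)
--     Returns: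
--         dict: Affectation satisfaisante, ou None si impossible
--     """
--     variables = list(range(1, num_vars + 1))
--     n = num_vars
--
--     for values in product([False, True], repeat=n):
--         # Créer l'affectation
--         assignment = {}
--         for i in range(n):
--             assignment[variables[i]] = values[i]
--         # Vérifier si ça marche
--         if verify_sat(formula, assignment):
--             return assignment
--
--     return None # Aucune solution
-- ===== SOURCE B (Python) =====
-- def solve_sat_bruteforce(formula, num_vars):
--     """Iterative backtracking: extend the partial assignment t (vars 1..len(t),
--     False before True), pruning as soon as some clause has no true literal and
--     no still-assignable literal; on a dead prefix, jump to the next candidate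
--     by flipping the deepest False choice. Same first answer as brute force."""
--
--     def clause_dead(clause, t):
--         # clause can no longer be satisfied under the partial assignment t
--         sat = False
--         open_ = False
--         for lit in clause:
--             var = abs(lit)
--             if 1 <= var <= len(t):
--                 if t[var - 1] == (lit > 0):
--                     sat = True
--                     break
--             elif 1 <= var <= num_vars:
--                 open_ = True
--         return not sat and not open_
--
--     def flip_last_false(t):
--         # next branch: drop trailing True choices, flip the deepest False
--         for i in range(len(t) - 1, -1, -1):
--             if not t[i]:
--                 return t[:i] + [True]
--         return None
--
--     t = []
--     while True:
--         if any(clause_dead(clause, t) for clause in formula):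
--             t = flip_last_false(t)
--             if t is None:
--                 return None
--         elif len(t) < num_vars:
--             t.append(False)
--         else:
--             return {i + 1: v for i, v in enumerate(t)}
-- ===== Notes on version B (the rewrite author's own statement) =====
-- stated objective: alternative
-- what changed: Replaced exhaustive enumeration of all 2^n assignments (rebuilding and fully re-verifying a dict for each) with an iterative backtracking search that extends a partial assignment for variables 1..n in order (False before True) and, whenever some clause has no true literal and no still-assignable literal, skips the whole dead subtree by flipping the deepest False choice; it yields the same first-in-enumeration-order satisfying assignment (intended to scale much better thanks to pruning; …
import Mathlib
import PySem

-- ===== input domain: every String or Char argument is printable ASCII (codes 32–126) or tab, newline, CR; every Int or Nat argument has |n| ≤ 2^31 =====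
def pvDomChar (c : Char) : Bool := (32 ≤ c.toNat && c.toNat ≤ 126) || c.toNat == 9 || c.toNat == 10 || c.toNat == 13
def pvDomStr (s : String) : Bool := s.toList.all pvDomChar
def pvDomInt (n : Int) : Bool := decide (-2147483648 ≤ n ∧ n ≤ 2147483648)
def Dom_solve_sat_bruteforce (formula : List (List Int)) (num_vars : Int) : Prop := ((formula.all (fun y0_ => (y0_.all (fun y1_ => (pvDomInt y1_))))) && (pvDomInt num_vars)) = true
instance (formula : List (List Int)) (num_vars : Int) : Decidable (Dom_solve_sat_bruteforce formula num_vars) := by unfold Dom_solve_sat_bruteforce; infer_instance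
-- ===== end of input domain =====

-- B replaces the 2^n full-enumeration (rebuild + re-verify a dict per tuple) by ordered
-- backtracking (vars 1..n, False before True) with clause-based pruning; same first answer.

-- ===== PORT A =====
-- verify_sat: the two loops with break/early-return are exactly List.all / List.any
def verify_sat (formula : List (List Int)) (assignment : PySem.Dict Int Bool) : Bool :=
  formula.all fun clause => clause.any fun literal =>
    let var : Int := |literal|
    let is_positive := decide (0 < literal)
    match assignment.get? var with          -- 'if var in assignment: … assignment[var]'
    | some b => (is_positive && b) || (!is_positive && !b)
    | none => false

-- itertools.product([False, True], repeat=n): first coordinate varies slowest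
def pyProductBools : Nat → List (List Bool)
  | 0 => [[]]
  | n + 1 => (pyProductBools n).map (false :: ·) ++ (pyProductBools n).map (true :: ·)

-- 'for i in range(n): assignment[vars_[i]] = values[i]'
-- (indices are always in range: i < n = len(vars_) = len(values), so .getD is never hit)
def mkAssignA (vars_ : List Int) (values : List Bool) (n : Nat) : PySem.Dict Int Bool :=
  (List.range n).foldl
    (fun d i => d.insert ((PySem.List.pyGet? vars_ (Int.ofNat i)).getD 0)
                         ((PySem.List.pyGet? values (Int.ofNat i)).getD false))
    PySem.Dict.empty

-- 'for values in product(...): … if verify_sat(...): return assignment'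
def loopA (formula : List (List Int)) (vars_ : List Int) (n : Nat) :
    List (List Bool) → Option (List (Int × Bool))
  | [] => none
  | values :: rest =>
    let assignment := mkAssignA vars_ values n
    if verify_sat formula assignment then some assignment.items
    else loopA formula vars_ n rest

def solve_sat_bruteforce (formula : List (List Int)) (num_vars : Int) : Option (List (Int × Bool)) :=
  let vars_ := PySem.List.pyRange 1 (num_vars + 1) 1
  -- product(..., repeat=n) raises ValueError for n < 0: Pre_ requires 0 ≤ num_vars
  let n := num_vars.toNat
  loopA formula vars_ n (pyProductBools n)

-- ===== PORT B =====
-- clause_dead(clause, t): the sat/open_ flag loop with break; 'not sat and not open_' is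
-- insensitive to the open_ literals skipped after the break, so the flags are two List.any scans
-- (t[var - 1] is always in range there thanks to the '1 <= var <= len(t)' guard, so .getD is never hit)
def clauseDeadB (num_vars : Int) (t : List Bool) (clause : List Int) : Bool :=
  let sat := clause.any fun lit =>
    decide (1 ≤ |lit| ∧ |lit| ≤ (t.length : Int)) &&
      (t.getD (|lit| - 1).toNat false == decide (0 < lit))
  let opn := clause.any fun lit =>
    !decide (1 ≤ |lit| ∧ |lit| ≤ (t.length : Int)) && decide (1 ≤ |lit| ∧ |lit| ≤ num_vars)
  !sat && !opn

-- flip_last_false(t): the backwards index scan 'for i in reversed(range(len(t)))' drops the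
-- trailing True entries and replaces the deepest False by True (t[:i] + [True])
def flipLastFalse (t : List Bool) : Option (List Bool) :=
  match (t.reverse).dropWhile (fun b => b) with
  | [] => none
  | _ :: rest => some ((true :: rest).reverse)

-- ---- lemmas cited by machineB for its termination measure (the Python loop terminates
-- ---- because each flip strictly advances the candidate; pvVal is the candidate's rank) ----

def pvVal (n : Nat) : List Bool → Nat
  | [] => 0
  | b :: t => (if b then 2 ^ (n - 1) else 0) + pvVal (n - 1) t

lemma pvVal_lt (n : Nat) (t : List Bool) (h : t.length ≤ n) : pvVal n t < 2 ^ n := by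
  induction t generalizing n with
  | nil => simpa [pvVal] using Nat.two_pow_pos n
  | cons b s ih =>
    simp only [List.length_cons] at h
    have h1 : pvVal (n - 1) s < 2 ^ (n - 1) := ih (n - 1) (by omega)
    have h2 : 2 ^ n = 2 ^ (n - 1) + 2 ^ (n - 1) := by
      rw [← two_mul, ← pow_succ']
      congr 1
      omega
    cases b <;> simp [pvVal] <;> omega

lemma pvVal_append (n : Nat) (t : List Bool) (b : Bool) :
    pvVal n (t ++ [b]) = pvVal n t + (if b then 2 ^ (n - t.length - 1) else 0) := by
  induction t generalizing n with
  | nil => simp [pvVal]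
  | cons c s ih =>
    simp only [List.cons_append, pvVal, ih (n - 1), List.length_cons]
    have : n - 1 - s.length - 1 = n - (s.length + 1) - 1 := by omega
    rw [this]
    ring

lemma flipLastFalse_append_true (t : List Bool) :
    flipLastFalse (t ++ [true]) = flipLastFalse t := by
  simp [flipLastFalse, List.dropWhile]

lemma flipLastFalse_append_false (t : List Bool) :
    flipLastFalse (t ++ [false]) = some (t ++ [true]) := by
  simp [flipLastFalse, List.dropWhile]

lemma flipLastFalse_len_le (t t' : List Bool) (h : flipLastFalse t = some t') :
    t'.length ≤ t.length := by
  induction t using List.reverseRecOn generalizing t' with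
  | nil => simp [flipLastFalse] at h
  | append_singleton s b ih =>
    cases b with
    | true =>
      rw [flipLastFalse_append_true] at h
      have := ih t' h
      simp only [List.length_append, List.length_cons, List.length_nil]
      omega
    | false =>
      rw [flipLastFalse_append_false] at h
      cases h
      simp

lemma flipLastFalse_pvVal (n : Nat) (t t' : List Bool) (h : flipLastFalse t = some t')
    (hlen : t.length ≤ n) : pvVal n t' = pvVal n t + 2 ^ (n - t.length) := by
  induction t using List.reverseRecOn generalizing t' with
  | nil => simp [flipLastFalse] at h
  | append_singleton s b ih =>
    have hsl : s.length + 1 ≤ n := by simpa using hlen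
    cases b with
    | true =>
      rw [flipLastFalse_append_true] at h
      rw [ih t' h (by omega), pvVal_append]
      have h2 : 2 ^ (n - s.length) = 2 ^ (n - s.length - 1) + 2 ^ (n - s.length - 1) := by
        rw [← two_mul, ← pow_succ']
        congr 1
        omega
      have he : n - (s ++ [true]).length = n - s.length - 1 := by simp; omega
      rw [he]
      simp only [if_true]
      omega
    | false =>
      rw [flipLastFalse_append_false] at h
      cases h
      rw [pvVal_append, pvVal_append]
      have he : n - (s ++ [false]).length = n - s.length - 1 := by simp; omega
      rw [he]
      simp

-- the iterative 'while True' loop; state = current candidate prefix t (vars 1..len(t));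
-- terminates because a flip strictly increases pvVal and a descent shrinks n - len(t)
def machineB (formula : List (List Int)) (num_vars : Int) (n : Nat) :
    (t : List Bool) → t.length ≤ n → Option (List (Int × Bool))
  | t, h =>
    if formula.any (clauseDeadB num_vars t) then
      match hstep : flipLastFalse t with
      | none => none                                  -- 'if t is None: return None'
      | some t' => machineB formula num_vars n t' (le_trans (flipLastFalse_len_le t t' hstep) h)
    else if hlt : t.length < n then
      machineB formula num_vars n (t ++ [false]) (by simpa using hlt)
    else
      -- '{i + 1: v for i, v in enumerate(t)}'
      some (((PySem.List.enumerate t 0).foldl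
        (fun d p => d.insert (p.1 + 1) p.2) PySem.Dict.empty).items)
  termination_by t _ => (2 ^ n - pvVal n t, n - t.length)
  decreasing_by
  · have h1 := flipLastFalse_pvVal n t t' hstep h
    have h3 := pvVal_lt n t' (le_trans (flipLastFalse_len_le t t' hstep) h)
    have h4 : 0 < 2 ^ (n - t.length) := Nat.two_pow_pos _
    exact Prod.Lex.left _ _ (by omega)
  · have h1 : pvVal n (t ++ [false]) = pvVal n t := by rw [pvVal_append]; simp
    rw [h1]
    refine Prod.Lex.right _ ?_
    simp only [List.length_append, List.length_cons, List.length_nil]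
    omega

def solve_sat_bruteforce_alt (formula : List (List Int)) (num_vars : Int) : Option (List (Int × Bool)) :=
  machineB formula num_vars num_vars.toNat [] (by simp)

-- ===== PRECONDITION & SPEC =====
-- Pre_ excludes exactly num_vars < 0, where A raises ValueError (product(repeat=n) with n < 0).
def Pre_solve_sat_bruteforce (formula : List (List Int)) (num_vars : Int) : Prop := 0 ≤ num_vars
instance (formula : List (List Int)) (num_vars : Int) : Decidable (Pre_solve_sat_bruteforce formula num_vars) := by
  unfold Pre_solve_sat_bruteforce; infer_instance

def pvWitness_solve_sat_bruteforce : List (List Int) × Int := ([[1, -2], [-1]], 2)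

def Spec_solve_sat_bruteforce (formula : List (List Int)) (num_vars : Int) (out : Option (List (Int × Bool))) : Prop :=
  out = solve_sat_bruteforce_alt formula num_vars
instance (formula : List (List Int)) (num_vars : Int) (out : Option (List (Int × Bool))) : Decidable (Spec_solve_sat_bruteforce formula num_vars out) := by
  unfold Spec_solve_sat_bruteforce; infer_instance

-- ===== CLAIM (what is proved, stated in full; the proofs are below) =====
def Claim_equal_solve_sat_bruteforce : Prop := ∀ (formula : List (List Int)) (num_vars : Int), Dom_solve_sat_bruteforce formula num_vars → Pre_solve_sat_bruteforce formula num_vars → Spec_solve_sat_bruteforce formula num_vars (solve_sat_bruteforce formula num_vars)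

-- ===== LEMMAS AND PROOFS =====

-- ==== bridge from the iterative machine to the recursive search backtrackB ====

-- proof-side recursive backtracking over the same pruning test, on the Dict view
def clauseDead (num_vars : Int) (asg : PySem.Dict Int Bool) (clause : List Int) : Bool :=
  let sat := clause.any fun lit => asg.get? |lit| == some (decide (0 < lit))
  let opn := clause.any fun lit => (asg.get? |lit|).isNone && decide (1 ≤ |lit| ∧ |lit| ≤ num_vars)
  !sat && !opn

def backtrackB (formula : List (List Int)) (num_vars : Int) :
    Nat → Int → PySem.Dict Int Bool → Option (List (Int × Bool))
  | rem, v, asg =>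
    if formula.any (clauseDead num_vars asg) then none
    else
      match rem with
      | 0 => some asg.items
      | rem + 1 =>
        (backtrackB formula num_vars rem (v + 1) (asg.insert v false)).orElse
          (fun _ => backtrackB formula num_vars rem (v + 1) (asg.insert v true))


-- the association list [(v, p₀), (v+1, p₁), …]
def asgFrom (v : Int) : List Bool → List (Int × Bool)
  | [] => []
  | b :: t => (v, b) :: asgFrom (v + 1) t

lemma asgFrom_append_singleton (v : Int) (p : List Bool) (b : Bool) :
    asgFrom v (p ++ [b]) = asgFrom v p ++ [(v + p.length, b)] := by
  induction p generalizing v with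
  | nil => simp [asgFrom]
  | cons x t ih => simp [asgFrom, ih (v + 1)]; ring_nf

lemma get?_asgFrom (p : List Bool) (v k : Int) :
    (PySem.Dict.mk (asgFrom v p)).get? k = if v ≤ k then p[(k - v).toNat]? else none := by
  induction p generalizing v with
  | nil =>
    simp only [asgFrom]
    rw [show (PySem.Dict.mk ([] : List (Int × Bool))) = PySem.Dict.empty from rfl,
        PySem.Dict.get?_empty]
    simp
  | cons b t ih =>
    simp only [asgFrom]
    rw [PySem.Dict.get?_mk_cons, ih (v + 1)]
    by_cases hvk : v = k
    · simp [hvk]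
    · have : (v == k) = false := by simp [hvk]
      rw [this]
      simp only [Bool.false_eq_true, if_false]
      by_cases h1 : v + 1 ≤ k
      · have hle : v ≤ k := by omega
        have : (k - v).toNat = (k - (v + 1)).toNat + 1 := by omega
        simp [h1, hle, this]
      · have : ¬ v ≤ k := by omega
        simp [h1, this]

lemma get?_asgFrom_one (p : List Bool) (k : Int) :
    (PySem.Dict.mk (asgFrom 1 p)).get? k = if 1 ≤ k then p[(k - 1).toNat]? else none :=
  get?_asgFrom p 1 k

lemma length_mem_pyProductBools (n : Nat) (s : List Bool) (hs : s ∈ pyProductBools n) :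
    s.length = n := by
  induction n generalizing s with
  | zero => simp [pyProductBools] at hs; simp [hs]
  | succ m ih =>
    simp only [pyProductBools, List.mem_append, List.mem_map] at hs
    rcases hs with ⟨t, ht, rfl⟩ | ⟨t, ht, rfl⟩ <;> simp [ih t ht]

lemma asgFrom_eq_map (p : List Bool) (v : Int) :
    asgFrom v p = (List.range p.length).map (fun i : Nat => ((v + (i : Int), p.getD i false) : Int × Bool)) := by
  induction p generalizing v with
  | nil => simp [asgFrom]
  | cons b t ih =>
    simp only [asgFrom, List.length_cons, List.range_succ_eq_map, List.map_cons, List.map_map]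
    rw [ih (v + 1)]
    congr 1
    · simp
    · apply List.map_congr_left
      intro i _
      simp only [Function.comp_apply, List.getD_cons_succ, Prod.mk.injEq]
      exact ⟨by push_cast; ring, by trivial⟩

lemma mkAssignA_eq (values : List Bool) (n : Nat) (hlen : values.length = n) :
    mkAssignA (PySem.List.pyRange 1 ((n : Int) + 1) 1) values n = PySem.Dict.mk (asgFrom 1 values) := by
  apply PySem.Dict.ext
  unfold mkAssignA
  rw [PySem.Dict.items_foldl_insert_fresh]
  · show [] ++ _ = _
    rw [List.nil_append, asgFrom_eq_map values 1, ← hlen]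
    apply List.map_congr_left
    intro i hi
    rw [List.mem_range] at hi
    have h1 : PySem.List.pyGet? (PySem.List.pyRange 1 ((n : Int) + 1) 1) (Int.ofNat i) = some (1 + (i : Int)) := by
      rw [show Int.ofNat i = ((i : Nat) : Int) from rfl, PySem.List.pyGet?_natCast,
          PySem.List.getElem?_pyRange_one, if_pos (by omega)]
    have h2 : PySem.List.pyGet? values (Int.ofNat i) = some (values.getD i false) := by
      rw [show Int.ofNat i = (i : Int) from rfl, PySem.List.pyGet?_natCast]
      rw [List.getElem?_eq_getElem (by omega), List.getD_eq_getElem?_getD,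
          List.getElem?_eq_getElem (by omega)]
      rfl
    simp [h1, h2, hi]
  · intro a _; exact PySem.Dict.contains_empty _
  · -- the keys 1+i are pairwise distinct
    have : ∀ l : List Nat, l.Nodup →
        (l.map (fun i => (PySem.List.pyGet? (PySem.List.pyRange 1 ((n : Int) + 1) 1) (Int.ofNat i)).getD 0)).Nodup →
        True := fun _ _ _ => trivial
    refine List.Nodup.map_on ?_ (List.nodup_range)
    intro x hx y hy hxy
    rw [List.mem_range] at hx hy
    have ex : ∀ i : Nat, i < n → (PySem.List.pyGet? (PySem.List.pyRange 1 ((n : Int) + 1) 1) (Int.ofNat i)).getD 0 = 1 + i := by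
      intro i hi
      rw [show Int.ofNat i = ((i : Nat) : Int) from rfl, PySem.List.pyGet?_natCast,
          PySem.List.getElem?_pyRange_one, if_pos (by omega)]
      rfl
    rw [ex x hx, ex y hy] at hxy
    omega

-- per-literal agreement between A's evaluation and B's 'sat' test
lemma literal_eval_eq (asg : PySem.Dict Int Bool) (lit : Int) :
    (match asg.get? |lit| with
     | some b => (decide (0 < lit) && b) || (!decide (0 < lit) && !b)
     | none => false) = (asg.get? |lit| == some (decide (0 < lit))) := by
  cases h : asg.get? |lit| with
  | none => simp
  | some b => cases b <;> cases hp : decide (0 < lit) <;> simp [h]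

-- at a full assignment no literal is 'open', so clauseDead = ¬(clause satisfied)
lemma clauseDead_full (nv : Int) (p : List Bool) (hlen : (p.length : Int) = nv) (clause : List Int) :
    clauseDead nv (PySem.Dict.mk (asgFrom 1 p)) clause
      = !(clause.any fun literal =>
          match (PySem.Dict.mk (asgFrom 1 p)).get? |literal| with
          | some b => (decide (0 < literal) && b) || (!decide (0 < literal) && !b)
          | none => false) := by
  unfold clauseDead
  have hopn : (clause.any fun lit =>
      ((PySem.Dict.mk (asgFrom 1 p)).get? |lit|).isNone && decide (1 ≤ |lit| ∧ |lit| ≤ nv)) = false := by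
    rw [List.any_eq_false]
    intro lit _
    by_cases h : 1 ≤ |lit| ∧ |lit| ≤ nv
    · have : (PySem.Dict.mk (asgFrom 1 p)).get? |lit| = some (p[(|lit| - 1).toNat]'(by omega)) := by
        rw [get?_asgFrom_one, if_pos h.1, List.getElem?_eq_getElem (by omega)]
      simp [this]
    · simp [h]
  rw [hopn]
  simp only [Bool.not_false, Bool.and_true]
  exact congrArg (!·) (List.any_congr rfl (fun lit => (literal_eval_eq (PySem.Dict.mk (asgFrom 1 p)) lit).symm))

lemma verify_eq_not_anyDead (nv : Int) (p : List Bool) (hlen : (p.length : Int) = nv)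
    (formula : List (List Int)) :
    verify_sat formula (PySem.Dict.mk (asgFrom 1 p))
      = !(formula.any (clauseDead nv (PySem.Dict.mk (asgFrom 1 p)))) := by
  unfold verify_sat
  rw [show (formula.any (clauseDead nv (PySem.Dict.mk (asgFrom 1 p))))
        = formula.any (fun clause => !(clause.any fun literal =>
            match (PySem.Dict.mk (asgFrom 1 p)).get? |literal| with
            | some b => (decide (0 < literal) && b) || (!decide (0 < literal) && !b)
            | none => false)) from List.any_congr rfl (fun c => clauseDead_full nv p hlen c)]
  rw [List.any_eq_not_all_not]
  simp

-- a dead clause stays false under every completion of the current prefix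
lemma dead_sound (formula : List (List Int)) (nv : Int) (p s : List Bool)
    (hfull : (p.length : Int) + (s.length : Int) = nv)
    (hdead : formula.any (clauseDead nv (PySem.Dict.mk (asgFrom 1 p))) = true) :
    verify_sat formula (PySem.Dict.mk (asgFrom 1 (p ++ s))) = false := by
  rw [List.any_eq_true] at hdead
  obtain ⟨clause, hc, hcd⟩ := hdead
  unfold clauseDead at hcd
  simp only [Bool.and_eq_true, Bool.not_eq_true'] at hcd
  obtain ⟨hsat, hopn⟩ := hcd
  rw [List.any_eq_false] at hsat hopn
  unfold verify_sat
  rw [List.all_eq_false]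
  refine ⟨clause, hc, ?_⟩
  simp only [Bool.not_eq_true]
  rw [List.any_eq_false]
  intro lit hlit
  have hs := hsat lit hlit
  have ho := hopn lit hlit
  simp only [Bool.not_eq_true, Bool.and_eq_false_iff, Option.isNone_eq_false_iff, decide_eq_false_iff_not] at ho
  cases hget : (PySem.Dict.mk (asgFrom 1 p)).get? |lit| with
  | some b =>
    -- assigned in the prefix: same value in the completion, and it falsifies the literal
    have hb : b ≠ decide (0 < lit) := by
      intro h; rw [hget, h] at hs; simp at hs
    have hk : 1 ≤ |lit| ∧ (|lit| - 1).toNat < p.length := by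
      rw [get?_asgFrom_one] at hget
      by_cases h1 : (1 : Int) ≤ |lit|
      · rw [if_pos h1] at hget
        exact ⟨h1, by
          by_contra hlt
          rw [List.getElem?_eq_none (by omega)] at hget
          simp at hget⟩
      · rw [if_neg h1] at hget; simp at hget
    have hget' : (PySem.Dict.mk (asgFrom 1 (p ++ s))).get? |lit| = some b := by
      rw [get?_asgFrom_one, if_pos hk.1, List.getElem?_append_left hk.2]
      rw [get?_asgFrom_one, if_pos hk.1] at hget
      exact hget
    rw [hget']
    cases b <;> cases hp : decide (0 < lit) <;> simp_all
  | none =>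
    -- unassigned and not open: |lit| = 0 or |lit| > nv, so also unassigned at the leaf
    have ho' : ¬(1 ≤ |lit| ∧ |lit| ≤ nv) := by
      rcases ho with h | h
      · rw [hget] at h; simp at h
      · exact h
    have hout : |lit| < 1 ∨ nv < |lit| := by
      by_cases h1 : (1:Int) ≤ |lit|
      · right; by_contra h; exact ho' ⟨h1, by omega⟩
      · left; omega
    have : (PySem.Dict.mk (asgFrom 1 (p ++ s))).get? |lit| = none := by
      rw [get?_asgFrom_one]
      rcases hout with h | h
      · rw [if_neg (by omega)]
      · rw [get?_asgFrom_one] at hget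
        by_cases h1 : (1:Int) ≤ |lit|
        · rw [if_pos h1]
          apply List.getElem?_eq_none
          simp only [List.length_append]
          omega
        · rw [if_neg h1]
    rw [this]
    simp

lemma loopA_append (formula : List (List Int)) (vars_ : List Int) (n : Nat)
    (l1 l2 : List (List Bool)) :
    loopA formula vars_ n (l1 ++ l2)
      = (loopA formula vars_ n l1).orElse (fun _ => loopA formula vars_ n l2) := by
  induction l1 with
  | nil => simp [loopA]
  | cons x t ih =>
    simp only [List.cons_append, loopA]
    by_cases h : verify_sat formula (mkAssignA vars_ x n) = true
    · simp [h]
    · simp only [Bool.not_eq_true] at h; simp [h, ih]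

lemma loopA_none (formula : List (List Int)) (vars_ : List Int) (n : Nat)
    (l : List (List Bool))
    (h : ∀ values ∈ l, verify_sat formula (mkAssignA vars_ values n) = false) :
    loopA formula vars_ n l = none := by
  induction l with
  | nil => rfl
  | cons x t ih =>
    simp only [loopA]
    rw [h x (List.mem_cons_self ..)]
    simp only [Bool.false_eq_true, if_false]
    exact ih (fun v hv => h v (List.mem_cons_of_mem _ hv))

lemma dict_insert_fresh_append (p : List Bool) (b : Bool) :
    (PySem.Dict.mk (asgFrom 1 p)).insert ((p.length : Int) + 1) b
      = PySem.Dict.mk (asgFrom 1 (p ++ [b])) := by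
  apply PySem.Dict.ext
  rw [PySem.Dict.items_insert_of_not_contains]
  · show asgFrom 1 p ++ _ = _
    rw [asgFrom_append_singleton]
    simp [add_comm]
  · rw [PySem.Dict.contains_eq_isSome_get?, get?_asgFrom_one]
    rw [if_pos (by omega), List.getElem?_eq_none (by omega)]
    rfl

-- main invariant: backtracking from prefix p = brute force over all completions of p
lemma main_invariant (formula : List (List Int)) (nv : Int) (hnv : 0 ≤ nv) :
    ∀ (rem : Nat) (p : List Bool), (p.length : Int) + (rem : Int) = nv →
      backtrackB formula nv rem ((p.length : Int) + 1) (PySem.Dict.mk (asgFrom 1 p))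
        = loopA formula (PySem.List.pyRange 1 (nv + 1) 1) nv.toNat
            ((pyProductBools rem).map (p ++ ·)) := by
  intro rem
  induction rem with
  | zero =>
    intro p hp
    have hpl : (p.length : Int) = nv := by omega
    have hpn : p.length = nv.toNat := by omega
    rw [backtrackB]
    simp only [pyProductBools, List.map_cons, List.map_nil, List.append_nil]
    rw [loopA]
    have hmk : mkAssignA (PySem.List.pyRange 1 (nv + 1) 1) p nv.toNat
        = PySem.Dict.mk (asgFrom 1 p) := by
      have := mkAssignA_eq p nv.toNat hpn
      rwa [show ((nv.toNat : Int) + 1) = nv + 1 from by omega] at this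
    rw [hmk, verify_eq_not_anyDead nv p hpl formula]
    cases h : formula.any (clauseDead nv (PySem.Dict.mk (asgFrom 1 p))) <;> simp [loopA]
  | succ m ih =>
    intro p hp
    rw [backtrackB]
    have hsplit : (pyProductBools (m + 1)).map (p ++ ·)
        = ((pyProductBools m).map ((p ++ [false]) ++ ·)) ++ ((pyProductBools m).map ((p ++ [true]) ++ ·)) := by
      simp only [pyProductBools, List.map_append, List.map_map]
      congr 1 <;> apply List.map_congr_left <;> intro s _ <;> simp [Function.comp]
    by_cases hdead : formula.any (clauseDead nv (PySem.Dict.mk (asgFrom 1 p))) = true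
    · rw [if_pos hdead, hsplit, loopA_append]
      have hnone : ∀ b : Bool, loopA formula (PySem.List.pyRange 1 (nv + 1) 1) nv.toNat
          ((pyProductBools m).map ((p ++ [b]) ++ ·)) = none := by
        intro b
        apply loopA_none
        intro values hv
        rw [List.mem_map] at hv
        obtain ⟨s, hs, rfl⟩ := hv
        have hslen := length_mem_pyProductBools m s hs
        have hlen : ((p ++ [b]) ++ s).length = nv.toNat := by
          simp [hslen]; omega
        have hmk := mkAssignA_eq ((p ++ [b]) ++ s) nv.toNat hlen
        rw [show ((nv.toNat : Int) + 1) = nv + 1 from by omega] at hmk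
        rw [hmk, List.append_assoc]
        apply dead_sound formula nv p ([b] ++ s)
        · simp [hslen]; omega
        · exact hdead
      rw [hnone false, hnone true]
      rfl
    · rw [if_neg hdead]
      have hstep : ∀ b : Bool,
          backtrackB formula nv m ((p.length : Int) + 1 + 1) ((PySem.Dict.mk (asgFrom 1 p)).insert ((p.length : Int) + 1) b)
            = loopA formula (PySem.List.pyRange 1 (nv + 1) 1) nv.toNat
                ((pyProductBools m).map ((p ++ [b]) ++ ·)) := by
        intro b
        rw [dict_insert_fresh_append]
        have := ih (p ++ [b]) (by simp; omega)
        rwa [show (((p ++ [b]).length : Int) + 1) = (p.length : Int) + 1 + 1 from by simp] at this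
      rw [hstep false, hstep true, hsplit, loopA_append]

lemma clauseDeadB_eq (num_vars : Int) (t : List Bool) (clause : List Int) :
    clauseDeadB num_vars t clause = clauseDead num_vars (PySem.Dict.mk (asgFrom 1 t)) clause := by
  have hget : ∀ lit : Int, (PySem.Dict.mk (asgFrom 1 t)).get? |lit|
      = if 1 ≤ |lit| then t[(|lit| - 1).toNat]? else none := fun lit => get?_asgFrom_one t |lit|
  have hsat : (clause.any fun lit =>
        decide (1 ≤ |lit| ∧ |lit| ≤ (t.length : Int)) &&
          (t.getD (|lit| - 1).toNat false == decide (0 < lit)))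
      = (clause.any fun lit =>
        (PySem.Dict.mk (asgFrom 1 t)).get? |lit| == some (decide (0 < lit))) := by
    refine List.any_congr rfl (fun lit => ?_)
    rw [hget lit]
    by_cases hin : 1 ≤ |lit| ∧ |lit| ≤ (t.length : Int)
    · rw [if_pos hin.1, List.getElem?_eq_getElem (by omega)]
      rw [decide_eq_true hin]
      have hidx : (|lit| - 1).toNat < t.length := by omega
      rw [List.getD_eq_getElem?_getD, List.getElem?_eq_getElem hidx]
      simp
    · have hd : decide (1 ≤ |lit| ∧ |lit| ≤ (t.length : Int)) = false := by
        simp only [decide_eq_false_iff_not]; exact hin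
      rw [hd]
      by_cases h1 : (1 : Int) ≤ |lit|
      · rw [if_pos h1, List.getElem?_eq_none (by omega)]
        simp
      · rw [if_neg h1]
        simp
  have hopn : (clause.any fun lit =>
        !decide (1 ≤ |lit| ∧ |lit| ≤ (t.length : Int)) && decide (1 ≤ |lit| ∧ |lit| ≤ num_vars))
      = (clause.any fun lit =>
        ((PySem.Dict.mk (asgFrom 1 t)).get? |lit|).isNone && decide (1 ≤ |lit| ∧ |lit| ≤ num_vars)) := by
    refine List.any_congr rfl (fun lit => ?_)
    rw [hget lit]
    congr 1
    by_cases hin : 1 ≤ |lit| ∧ |lit| ≤ (t.length : Int)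
    · rw [if_pos hin.1, List.getElem?_eq_getElem (by omega)]
      simp [hin]
    · have hd : decide (1 ≤ |lit| ∧ |lit| ≤ (t.length : Int)) = false := by
        simp only [decide_eq_false_iff_not]; exact hin
      rw [hd]
      by_cases h1 : (1 : Int) ≤ |lit|
      · rw [if_pos h1, List.getElem?_eq_none (by omega)]
        simp
      · rw [if_neg h1]
        simp
  simp only [clauseDeadB, clauseDead]
  rw [hsat, hopn]

lemma anyDeadB_eq (formula : List (List Int)) (num_vars : Int) (t : List Bool) :
    formula.any (clauseDeadB num_vars t)
      = formula.any (clauseDead num_vars (PySem.Dict.mk (asgFrom 1 t))) :=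
  congrArg (fun p => formula.any p) (funext (fun c => clauseDeadB_eq num_vars t c))

-- the pending right siblings of the current prefix, deepest first
def conts : List Bool → List (List Bool)
  | [] => []
  | b :: t => (conts t).map (b :: ·) ++ (if b then [] else [[true]])

lemma conts_append_false (t : List Bool) : conts (t ++ [false]) = (t ++ [true]) :: conts t := by
  induction t with
  | nil => rfl
  | cons b s ih =>
    show (conts (s ++ [false])).map (b :: ·) ++ _ = _
    rw [ih]
    simp [conts]

lemma conts_append_true (t : List Bool) : conts (t ++ [true]) = conts t := by
  induction t with
  | nil => rfl
  | cons b s ih =>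
    show (conts (s ++ [true])).map (b :: ·) ++ _ = _
    rw [ih]
    rfl

lemma flipLastFalse_none_conts (t : List Bool) (h : flipLastFalse t = none) : conts t = [] := by
  induction t using List.reverseRecOn with
  | nil => rfl
  | append_singleton s b ih =>
    cases b with
    | true => rw [conts_append_true]; exact ih (by rwa [flipLastFalse_append_true] at h)
    | false => rw [flipLastFalse_append_false] at h; exact absurd h (by simp)

lemma flipLastFalse_some_conts (t t' : List Bool) (h : flipLastFalse t = some t') :
    conts t = t' :: conts t' := by
  induction t using List.reverseRecOn generalizing t' with
  | nil => simp [flipLastFalse] at h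
  | append_singleton s b ih =>
    cases b with
    | true =>
      rw [flipLastFalse_append_true] at h
      rw [conts_append_true]
      exact ih t' h
    | false =>
      rw [flipLastFalse_append_false] at h
      cases h
      rw [conts_append_false, conts_append_true]

-- '{i + 1: v for i, v in enumerate(t)}' builds exactly the association list asgFrom 1 t
lemma map_enumerate_asgFrom (t : List Bool) (s : Int) :
    (PySem.List.enumerate t s).map (fun p => (p.1 + 1, p.2)) = asgFrom (s + 1) t := by
  induction t generalizing s with
  | nil => simp [PySem.List.enumerate, asgFrom]
  | cons b u ih =>
    simp only [PySem.List.enumerate, List.map_cons, asgFrom]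
    rw [ih (s + 1)]

lemma enum_fold_items (t : List Bool) :
    ((PySem.List.enumerate t 0).foldl (fun d p => d.insert (p.1 + 1) p.2)
        PySem.Dict.empty).items = asgFrom 1 t := by
  rw [PySem.Dict.items_foldl_insert_fresh (PySem.List.enumerate t 0)
      (fun p => p.1 + 1) (fun p => p.2) PySem.Dict.empty
      (fun a _ => PySem.Dict.contains_empty _) ?_]
  · show [] ++ _ = _
    rw [List.nil_append]
    have := map_enumerate_asgFrom t 0
    simpa using this
  · have hmap : (PySem.List.enumerate t 0).map (fun p => p.1 + 1)
        = (PySem.List.pyRange 0 ((0 : Int) + t.length) 1).map (· + 1) := by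
      rw [← PySem.List.map_fst_enumerate t 0, List.map_map]
      rfl
    rw [hmap]
    exact (PySem.List.nodup_pyRange_one _ _).map (fun a b h => by omega)

lemma option_orElse_assoc {α : Type} (a b c : Option α) :
    (a.orElse (fun _ => b)).orElse (fun _ => c) = a.orElse (fun _ => b.orElse (fun _ => c)) := by
  cases a <;> rfl

-- the chain of searches still pending: current prefix, then its right siblings
def chainB (formula : List (List Int)) (num_vars : Int) (n : Nat) :
    List (List Bool) → Option (List (Int × Bool))
  | [] => none
  | p :: ps =>
    (backtrackB formula num_vars (n - p.length) ((p.length : Int) + 1)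
        (PySem.Dict.mk (asgFrom 1 p))).orElse
      (fun _ => chainB formula num_vars n ps)

lemma backtrackB_dead (formula : List (List Int)) (num_vars : Int) (rem : Nat) (v : Int)
    (asg : PySem.Dict Int Bool) (h : formula.any (clauseDead num_vars asg) = true) :
    backtrackB formula num_vars rem v asg = none := by
  cases rem with
  | zero => rw [backtrackB, if_pos h]
  | succ m => rw [backtrackB, if_pos h]

lemma machine_eq_chain (formula : List (List Int)) (num_vars : Int) (n : Nat) :
    ∀ (k : Nat) (t : List Bool) (h : t.length ≤ n),
      (2 ^ n - pvVal n t) * (n + 1) + (n - t.length) ≤ k →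
      machineB formula num_vars n t h = chainB formula num_vars n (t :: conts t) := by
  intro k
  induction k using Nat.strong_induction_on with
  | _ k ih =>
    intro t h hk
    rw [machineB]
    by_cases hdead : formula.any (clauseDeadB num_vars t) = true
    · rw [if_pos hdead]
      have hbt : backtrackB formula num_vars (n - t.length) ((t.length : Int) + 1)
          (PySem.Dict.mk (asgFrom 1 t)) = none :=
        backtrackB_dead _ _ _ _ _ (by rw [← anyDeadB_eq]; exact hdead)
      split
      next hstep =>
        rw [chainB, hbt, flipLastFalse_none_conts t hstep, chainB]
        rfl
      next t' hstep =>
        have hlen' : t'.length ≤ n := le_trans (flipLastFalse_len_le t t' hstep) h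
        have hpv := flipLastFalse_pvVal n t t' hstep h
        have hlt1 := pvVal_lt n t h
        have hlt2 := pvVal_lt n t' hlen'
        have hpow : 0 < 2 ^ (n - t.length) := Nat.two_pow_pos _
        have hmu : (2 ^ n - pvVal n t') * (n + 1) + (n - t'.length) < k := by
          have hx : 2 ^ n - pvVal n t' + 1 ≤ 2 ^ n - pvVal n t := by omega
          have hy : (2 ^ n - pvVal n t' + 1) * (n + 1) ≤ (2 ^ n - pvVal n t) * (n + 1) :=
            Nat.mul_le_mul_right _ hx
          have hz : (2 ^ n - pvVal n t' + 1) * (n + 1)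
              = (2 ^ n - pvVal n t') * (n + 1) + (n + 1) := by ring
          have hw : n - t'.length ≤ n := Nat.sub_le _ _
          omega
        rw [ih _ hmu t' hlen' (le_refl _), flipLastFalse_some_conts t t' hstep]
        conv_rhs => rw [chainB]
        rw [hbt]
        rfl
    · rw [if_neg hdead]
      have hdead' : formula.any (clauseDead num_vars (PySem.Dict.mk (asgFrom 1 t))) = false := by
        rw [← anyDeadB_eq]
        simpa using hdead
      by_cases hlt : t.length < n
      · rw [dif_pos hlt]
        have hpv : pvVal n (t ++ [false]) = pvVal n t := by rw [pvVal_append]; simp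
        have hmu : (2 ^ n - pvVal n (t ++ [false])) * (n + 1) + (n - (t ++ [false]).length) < k := by
          rw [hpv]
          simp only [List.length_append, List.length_cons, List.length_nil]
          omega
        rw [ih _ hmu (t ++ [false]) (by simp; omega) (le_refl _)]
        -- unfold one level of backtrackB at the current prefix
        obtain ⟨m, hm⟩ : ∃ m, n - t.length = m + 1 := ⟨n - t.length - 1, by omega⟩
        have hb : backtrackB formula num_vars (n - t.length) ((t.length : Int) + 1)
            (PySem.Dict.mk (asgFrom 1 t))
            = (backtrackB formula num_vars m ((t.length : Int) + 1 + 1)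
                ((PySem.Dict.mk (asgFrom 1 t)).insert ((t.length : Int) + 1) false)).orElse
              (fun _ => backtrackB formula num_vars m ((t.length : Int) + 1 + 1)
                ((PySem.Dict.mk (asgFrom 1 t)).insert ((t.length : Int) + 1) true)) := by
          rw [hm, backtrackB, if_neg (by simp [hdead'])]
        have hins : ∀ b : Bool, (PySem.Dict.mk (asgFrom 1 t)).insert ((t.length : Int) + 1) b
            = PySem.Dict.mk (asgFrom 1 (t ++ [b])) := fun b => dict_insert_fresh_append t b
        have harg : ∀ b : Bool,
            backtrackB formula num_vars m ((t.length : Int) + 1 + 1)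
              ((PySem.Dict.mk (asgFrom 1 t)).insert ((t.length : Int) + 1) b)
            = backtrackB formula num_vars (n - (t ++ [b]).length) (((t ++ [b]).length : Int) + 1)
              (PySem.Dict.mk (asgFrom 1 (t ++ [b]))) := by
          intro b
          rw [hins b]
          congr 1
          · simp; omega
          · push_cast
            simp
        show chainB formula num_vars n ((t ++ [false]) :: conts (t ++ [false]))
            = chainB formula num_vars n (t :: conts t)
        rw [conts_append_false]
        conv_rhs => rw [chainB]
        rw [hb, harg false, harg true, option_orElse_assoc]
        rfl
      · rw [dif_neg hlt]
        have hfull : t.length = n := by omega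
        conv_rhs => rw [chainB]
        have hb : backtrackB formula num_vars (n - t.length) ((t.length : Int) + 1)
            (PySem.Dict.mk (asgFrom 1 t)) = some (asgFrom 1 t) := by
          rw [hfull, Nat.sub_self, backtrackB, if_neg (by simp [hdead'])]
        rw [hb, enum_fold_items]
        rfl

-- ===== VERDICT (by name: the statement is the Claim_ definition above) =====
theorem solve_sat_bruteforce_spec : Claim_equal_solve_sat_bruteforce := by
  intro formula num_vars _ hpre
  unfold Spec_solve_sat_bruteforce
  have hpre' : (0 : Int) ≤ num_vars := hpre
  have h := main_invariant formula num_vars hpre' num_vars.toNat []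
    (by simp; omega)
  simp only [List.length_nil, Nat.cast_zero, zero_add] at h
  have halt : solve_sat_bruteforce_alt formula num_vars
      = backtrackB formula num_vars num_vars.toNat 1 (PySem.Dict.mk (asgFrom 1 [])) := by
    show machineB formula num_vars num_vars.toNat [] _ = _
    rw [machine_eq_chain formula num_vars num_vars.toNat
        ((2 ^ num_vars.toNat - pvVal num_vars.toNat []) * (num_vars.toNat + 1)
          + (num_vars.toNat - ([] : List Bool).length)) [] (by simp) (le_refl _)]
    show (backtrackB formula num_vars (num_vars.toNat - 0) (((([] : List Bool).length : Int)) + 1)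
        (PySem.Dict.mk (asgFrom 1 []))).orElse (fun _ => none) = _
    simp only [List.length_nil, Nat.cast_zero, zero_add, Nat.sub_zero]
    cases hb : backtrackB formula num_vars num_vars.toNat 1 (PySem.Dict.mk (asgFrom 1 [])) with
    | none => rfl
    | some x => rfl
  show loopA formula (PySem.List.pyRange 1 (num_vars + 1) 1) num_vars.toNat (pyProductBools num_vars.toNat)
      = solve_sat_bruteforce_alt formula num_vars
  rw [halt, h, List.map_congr_left (fun s _ => List.nil_append s), List.map_id']
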